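-- pv_equiv track=rewrite | github.com/ftelleria77/ProdAction | tools/studies/iso/top_drill_corpus_order_analysis_2026_05_13.py | _top_block_count
-- ===== SOURCE A (Python) =====
-- from typing import Iterable, Sequence
--
-- def _top_block_count(families: Sequence[str]) -> int:
--     count = 0
--     previous = ""
--     for family in families:
--         if family == "top_drill" and previous != "top_drill":
--             count += 1
--         previous = family
--     return count
-- ===== SOURCE B (Python) =====
-- def _top_block_count(families) -> int:
--     fams = list(families)
--     total = fams.count("top_drill")
--     merged = sum(1 for a, b in zip(fams, fams[1:]) if a == b == "top_drill")
--     return total - merged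
-- ===== Notes on version B (the rewrite author's own statement) =====
-- stated objective: alternative
-- what changed: Replaced the stateful previous-element scan by an arithmetic identity: the number of maximal runs of the target equals its total occurrence count minus the number of adjacent positions where it occurs twice in a row, computed by two stateless passes (count plus a zip over the shifted list).
import Mathlib
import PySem

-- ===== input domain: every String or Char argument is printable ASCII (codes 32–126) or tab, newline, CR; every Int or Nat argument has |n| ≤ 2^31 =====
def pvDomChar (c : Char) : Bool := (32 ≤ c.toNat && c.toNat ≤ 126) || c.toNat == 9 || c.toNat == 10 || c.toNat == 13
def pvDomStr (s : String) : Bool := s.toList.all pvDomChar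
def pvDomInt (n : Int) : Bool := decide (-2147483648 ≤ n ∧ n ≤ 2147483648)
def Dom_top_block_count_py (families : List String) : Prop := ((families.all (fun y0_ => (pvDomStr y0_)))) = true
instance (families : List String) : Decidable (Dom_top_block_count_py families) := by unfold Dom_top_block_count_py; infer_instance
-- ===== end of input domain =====

-- B replaces A's previous-element tracking scan by the arithmetic identity runs = occurrences - adjacent pairs, via two stateless passes (alternative, same cost).


-- ===== PORT A =====
-- A's loop: count, previous carried through the list, step for step.
def topLoopA (count : Int) (previous : String) : List String → Int
  | [] => count
  | family :: rest =>
      topLoopA (if family = "top_drill" ∧ previous ≠ "top_drill" then count + 1 else count)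
        family rest

def top_block_count_py (families : List String) : Int :=
  topLoopA 0 "" families

-- ===== PORT B =====
-- Source B: total = fams.count("top_drill"); merged = sum over zip(fams, fams[1:]) of both-"top_drill" pairs; total - merged.
-- fams[1:] is ported as List.drop 1 (exact for a nonnegative in-range start).
def top_block_count_py_alt (families : List String) : Int :=
  let fams := families
  let total : Int := (PySem.List.count fams "top_drill" : Int)
  let merged : Int :=
    ((fams.zip (fams.drop 1)).countP (fun p => p.1 = "top_drill" ∧ p.2 = "top_drill") : Int)
  total - merged

-- ===== PRECONDITION & SPEC =====
def Spec_top_block_count_py (families : List String) (out : Int) : Prop := out = top_block_count_py_alt families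
instance (families : List String) (out : Int) : Decidable (Spec_top_block_count_py families out) := by unfold Spec_top_block_count_py; infer_instance

-- ===== CLAIM (what is proved, stated in full; the proofs are below) =====
def Claim_equal_top_block_count_py : Prop := ∀ (families : List String), Dom_top_block_count_py families → Spec_top_block_count_py families (top_block_count_py families)

-- ===== LEMMAS AND PROOFS =====

-- A's loop shifted to accumulator 0.
theorem topLoopA_shift (l : List String) (c : Int) (prev : String) :
    topLoopA c prev l = c + topLoopA 0 prev l := by
  induction l generalizing c prev with
  | nil => simp [topLoopA]
  | cons x xs ih =>
      simp only [topLoopA]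
      rw [ih, ih (if x = "top_drill" ∧ prev ≠ "top_drill" then (0:Int) + 1 else 0)]
      split <;> ring

-- Key lemma: A's loop from 0 with arbitrary previous = occurrences - adjacent pairs - boundary correction.
theorem loop_eq_count_sub_adj (l : List String) (prev : String) :
    topLoopA 0 prev l =
      (l.countP (fun k => k = "top_drill") : Int) -
        ((l.zip (l.drop 1)).countP (fun p => p.1 = "top_drill" ∧ p.2 = "top_drill") : Int) -
        (if l.head? = some "top_drill" ∧ prev = "top_drill" then 1 else 0) := by
  induction l generalizing prev with
  | nil => simp [topLoopA]
  | cons x xs ih =>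
      simp only [topLoopA]
      rw [topLoopA_shift, ih x]
      cases xs with
      | nil =>
          by_cases hx : x = "top_drill" <;> by_cases hp : prev = "top_drill" <;>
            simp [hx, hp]
      | cons y ys =>
          simp only [List.drop, List.zip_cons_cons, List.countP_cons, List.head?]
          by_cases hx : x = "top_drill" <;> by_cases hp : prev = "top_drill" <;>
            by_cases hy : y = "top_drill" <;>
            (simp_all; try ring)

-- ===== VERDICT (by name: the statement is the Claim_ definition above) =====
theorem top_block_count_py_spec : Claim_equal_top_block_count_py := by
  intro families _
  show top_block_count_py families = top_block_count_py_alt families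
  unfold top_block_count_py top_block_count_py_alt
  rw [loop_eq_count_sub_adj]
  have : (families.countP (fun k => k = "top_drill")) = families.count "top_drill" := by
    rw [List.count_eq_countP]; apply List.countP_congr; intro a _; simp [beq_iff_eq]
  simp [PySem.List.count_eq, this]
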